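-- pv_equiv track=rewrite | github.com/kunigami/pynumbers | skewedBinaryNumber.py | decimalToSkewedBinaryInner
-- ===== SOURCE A (Python) =====
-- def decimalToSkewedBinaryInner (n, weight):
--     if n < weight:
--         return (n, [])
--     else:
--         rest, skewDigits = decimalToSkewedBinaryInner(n, 2*weight + 1)
--         if rest == 2*weight :
--             return (0, skewDigits + [2])
--         elif rest >= weight :
--             return (rest - weight, skewDigits + [1])
--         else:
--             return (rest, skewDigits + [0])
-- ===== SOURCE B (Python) =====
-- def decimalToSkewedBinaryInner(n, weight):
--     # Phase 1: collect the ascending weight chain w, 2w+1, 4w+3, ... while n >= w.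
--     weights = []
--     w = weight
--     while n >= w:
--         weights.append(w)
--         w = 2 * w + 1
--     # Phase 2: one downward pass (largest weight first), building digits front-to-back.
--     rest = n
--     digits = []
--     for w in reversed(weights):
--         if rest == 2 * w:
--             rest = 0
--             digits.append(2)
--         elif rest >= w:
--             rest -= w
--             digits.append(1)
--         else:
--             digits.append(0)
--     return (rest, digits)
-- ===== Notes on version B (the rewrite author's own statement) =====
-- stated objective: alternative
-- what changed: Replaces the upward recursion with concatenation during unwind by an explicit iteratively-built weight list followed by a single downward pass that appends each digit once.
-- outside the precondition, e.g. on decimalToSkewedBinaryInner(5, -1): A raises RecursionError, B does not finish within the time limit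
import Mathlib
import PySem

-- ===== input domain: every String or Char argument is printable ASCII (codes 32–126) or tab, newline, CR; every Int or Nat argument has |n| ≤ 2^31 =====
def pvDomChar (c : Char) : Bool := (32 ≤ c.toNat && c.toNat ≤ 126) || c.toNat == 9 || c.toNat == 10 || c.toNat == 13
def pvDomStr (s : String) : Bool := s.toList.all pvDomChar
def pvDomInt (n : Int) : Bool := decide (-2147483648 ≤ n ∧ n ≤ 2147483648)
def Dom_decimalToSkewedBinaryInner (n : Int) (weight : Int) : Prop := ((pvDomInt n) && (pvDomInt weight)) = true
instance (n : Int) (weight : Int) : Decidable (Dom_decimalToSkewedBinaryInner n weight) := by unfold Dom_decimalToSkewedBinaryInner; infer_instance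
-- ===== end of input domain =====

-- ===== PORT A =====
-- B replaces the unwind-time concatenation recursion by an explicit weight list plus one
-- downward pass (objective: alternative decomposition). Python A hits RecursionError when
-- weight < 0 and n >= weight; that region is outside Pre_. The fuel (n.toNat + 2) bounds the
-- recursion depth, which Python's recursion reaches well within it whenever Pre_ holds
-- (fuel is a totality guard only; when it runs out the port returns the base value).
def pvGoA : Nat → Int → Int → Int × List Int
  | 0, n, _ => (n, [])
  | fuel+1, n, weight =>
    if n < weight then (n, [])
    else
      let r := pvGoA fuel n (2*weight + 1)
      let rest := r.1
      let skewDigits := r.2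
      if rest = 2*weight then (0, skewDigits ++ [2])
      else if rest ≥ weight then (rest - weight, skewDigits ++ [1])
      else (rest, skewDigits ++ [0])

def decimalToSkewedBinaryInner (n : Int) (weight : Int) : Int × List Int :=
  pvGoA (n.toNat + 2) n weight

-- ===== PORT B =====
-- the while loop of Source B, same totality fuel
def pvWeightsB : Nat → Int → Int → List Int
  | 0, _, _ => []
  | fuel+1, n, w => if n ≥ w then w :: pvWeightsB fuel n (2*w + 1) else []

-- the body of Source B's for loop over reversed(weights)
def pvStepB (acc : Int × List Int) (w : Int) : Int × List Int :=
  if acc.1 = 2*w then (0, acc.2 ++ [2])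
  else if acc.1 ≥ w then (acc.1 - w, acc.2 ++ [1])
  else (acc.1, acc.2 ++ [0])

def decimalToSkewedBinaryInner_alt (n : Int) (weight : Int) : Int × List Int :=
  ((pvWeightsB (n.toNat + 2) n weight).reverse).foldl pvStepB (n, [])

-- ===== PRECONDITION & SPEC =====
-- Pre_ excludes exactly the inputs where Python A raises RecursionError (weight < 0 with
-- n ≥ weight, where the weight chain 2w+1 never grows past n); Source B's while loop diverges there.
def Pre_decimalToSkewedBinaryInner (n : Int) (weight : Int) : Prop := 0 ≤ weight ∨ n < weight
instance (n : Int) (weight : Int) : Decidable (Pre_decimalToSkewedBinaryInner n weight) := by unfold Pre_decimalToSkewedBinaryInner; infer_instance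

def pvWitness_decimalToSkewedBinaryInner : Int × Int := (13, 1)

def Spec_decimalToSkewedBinaryInner (n : Int) (weight : Int) (out : Int × List Int) : Prop := out = decimalToSkewedBinaryInner_alt n weight
instance (n : Int) (weight : Int) (out : Int × List Int) : Decidable (Spec_decimalToSkewedBinaryInner n weight out) := by unfold Spec_decimalToSkewedBinaryInner; infer_instance

-- ===== CLAIM =====
def Claim_equal_decimalToSkewedBinaryInner : Prop := ∀ (n : Int) (weight : Int), Dom_decimalToSkewedBinaryInner n weight → Pre_decimalToSkewedBinaryInner n weight → Spec_decimalToSkewedBinaryInner n weight (decimalToSkewedBinaryInner n weight)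

-- ===== LEMMAS AND PROOFS =====
-- A's fueled recursion computes exactly B's downward fold over the same fueled weight chain.
theorem pvGoA_eq_fold (fuel : Nat) : ∀ (n w : Int),
    pvGoA fuel n w = ((pvWeightsB fuel n w).reverse).foldl pvStepB (n, []) := by
  induction fuel with
  | zero => intro n w; simp [pvGoA, pvWeightsB]
  | succ fuel ih =>
    intro n w
    by_cases h : n < w
    · simp [pvGoA, pvWeightsB, h, not_le.mpr h]
    · simp only [pvGoA, pvWeightsB, if_neg h, if_pos (not_lt.mp h), ge_iff_le,
        List.reverse_cons, List.foldl_append, List.foldl_cons, List.foldl_nil, ← ih n (2*w+1)]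
      rfl

-- ===== VERDICT =====
theorem decimalToSkewedBinaryInner_spec : Claim_equal_decimalToSkewedBinaryInner := by
  intro n weight _ _
  unfold Spec_decimalToSkewedBinaryInner decimalToSkewedBinaryInner decimalToSkewedBinaryInner_alt
  exact pvGoA_eq_fold _ n weight
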